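-- pv_equiv track=rewrite | github.com/MatthewDKnight/EFT2Obs-Demo | analysis-files/prod_decay_combined.py | splitRow
-- ===== SOURCE A (Python) =====
-- def splitRow(string):
-- 	"""
-- 	Will split a string into terms that start with '+' or '-'.
-- 	"""
-- 	pieces = []
-- 	i = 0
-- 	for j in range(len(string)):
-- 		if string[j] == "+" or string[j] == "-":
-- 			pieces.append(string[i:j])
-- 			i = j
-- 	pieces.append(string[i:].strip("\n"))
-- 	return pieces
-- ===== SOURCE B (Python) =====
-- def splitRow(string):
--     """
--     Will split a string into terms that start with '+' or '-'.
--     Single pass over the characters with a current-piece buffer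
--     (no index bookkeeping or slicing); only the final piece is
--     stripped of newlines.
--     """
--     pieces = []
--     cur = []
--     for ch in string:
--         if ch == '+' or ch == '-':
--             pieces.append(''.join(cur))
--             cur = [ch]
--         else:
--             cur.append(ch)
--     pieces.append(''.join(cur).strip('\n'))
--     return pieces
-- ===== Notes on version B (the rewrite author's own statement) =====
-- stated objective: simpler
-- what changed: A tracks the index of the last sign and appends slices string[i:j] taken from the original string; B drops all index bookkeeping and slicing, keeping a current-piece character buffer in a single pass over the characters and flushing it at each sign, stripping newlines only from the final piece.
import Mathlib
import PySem

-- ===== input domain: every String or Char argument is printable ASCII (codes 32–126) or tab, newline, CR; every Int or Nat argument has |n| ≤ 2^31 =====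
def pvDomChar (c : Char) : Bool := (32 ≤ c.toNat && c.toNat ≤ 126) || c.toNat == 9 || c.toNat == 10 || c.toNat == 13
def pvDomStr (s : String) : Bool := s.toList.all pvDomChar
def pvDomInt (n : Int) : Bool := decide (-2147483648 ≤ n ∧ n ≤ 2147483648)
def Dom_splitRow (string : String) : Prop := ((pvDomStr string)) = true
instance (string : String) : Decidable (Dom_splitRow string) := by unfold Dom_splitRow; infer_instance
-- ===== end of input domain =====

-- B replaces A's index/slice bookkeeping by a single pass with a current-piece buffer (simpler; same O(n) cost).

-- ===== PORT A =====
-- A's loop body: state (pieces, i); at a '+'/'-' at index j, append string[i:j] and set i := j.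
def stepA (s : List Char) (st : List (List Char) × Int) (j : Int) : List (List Char) × Int :=
  if PySem.List.pyGetD s j ' ' = '+' ∨ PySem.List.pyGetD s j ' ' = '-' then
    (st.1 ++ [PySem.List.slice s (some st.2) (some j)], j)
  else st

def splitRow (string : String) : List String :=
  let s := string.toList
  let st := (PySem.List.pyRange 0 (s.length : Int) 1).foldl (stepA s) ([], 0)
  (st.1 ++ [PySem.Chars.stripChars (PySem.List.slice s (some st.2) none) ['\n']]).map String.ofList

-- ===== PORT B =====
-- B's loop body: state (pieces, cur); a sign flushes cur and starts a new buffer with the sign.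
def stepB (st : List (List Char) × List Char) (c : Char) : List (List Char) × List Char :=
  if c = '+' ∨ c = '-' then (st.1 ++ [st.2], [c]) else (st.1, st.2 ++ [c])

def splitRow_alt (string : String) : List String :=
  let st := string.toList.foldl stepB ([], [])
  (st.1 ++ [PySem.Chars.stripChars st.2 ['\n']]).map String.ofList

-- ===== PRECONDITION & SPEC =====
def Spec_splitRow (string : String) (out : List String) : Prop := out = splitRow_alt string
instance (string : String) (out : List String) : Decidable (Spec_splitRow string out) := by unfold Spec_splitRow; infer_instance

-- ===== CLAIM (what is proved, stated in full; the proofs are below) =====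
def Claim_equal_splitRow : Prop := ∀ (string : String), Dom_splitRow string → Spec_splitRow string (splitRow string)

-- ===== LEMMAS AND PROOFS =====

-- The two loops agree: A's (pieces, last sign index i) state corresponds to B's
-- (pieces, buffer = s[i:j0]) state when the scan has reached position j0.
lemma loops_agree (s : List Char) :
    ∀ (k j0 i : Nat) (pieces : List (List Char)),
      s.length = j0 + k → i ≤ j0 →
      (((PySem.List.pyRange (j0 : Int) (s.length : Int) 1).foldl (stepA s) (pieces, (i : Int))).1,
        PySem.List.slice s
          (some ((PySem.List.pyRange (j0 : Int) (s.length : Int) 1).foldl (stepA s) (pieces, (i : Int))).2) none)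
      = (s.drop j0).foldl stepB (pieces, (s.drop i).take (j0 - i)) := by
  intro k
  induction k with
  | zero =>
      intro j0 i pieces hlen hij
      have hj0 : s.length = j0 := by omega
      have hnil : PySem.List.pyRange (j0 : Int) (s.length : Int) 1 = [] :=
        PySem.List.pyRange_one_eq_nil (by exact_mod_cast Nat.le_of_eq hj0)
      rw [hnil, List.foldl_nil, PySem.List.slice_from_natCast,
        List.drop_eq_nil_of_le (le_of_eq hj0), List.foldl_nil]
      have : (s.drop i).take (j0 - i) = s.drop i := by
        apply List.take_of_length_le
        simp [List.length_drop]; omega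
      rw [this]
  | succ k ih =>
      intro j0 i pieces hlen hij
      have hj0 : j0 < s.length := by omega
      rw [PySem.List.pyRange_one_cons (by exact_mod_cast hj0), List.foldl_cons,
        List.drop_eq_getElem_cons hj0, List.foldl_cons]
      have hget : PySem.List.pyGetD s ((j0 : Nat) : Int) ' ' = s[j0] := by
        simp [PySem.List.pyGetD_natCast, List.getD_eq_getElem?_getD, hj0]
      by_cases hsign : s[j0] = '+' ∨ s[j0] = '-'
      · -- sign at j0: A appends s[i:j0] and restarts at i := j0; B flushes the buffer.
        have hA : stepA s (pieces, (i : Int)) (j0 : Int)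
            = (pieces ++ [(s.drop i).take (j0 - i)], (j0 : Int)) := by
          simp only [stepA, hget, hsign, if_pos]
          rw [PySem.List.slice_natCast]
        have hB : stepB (pieces, (s.drop i).take (j0 - i)) s[j0]
            = (pieces ++ [(s.drop i).take (j0 - i)], [s[j0]]) := by
          simp only [stepB, hsign, if_pos]
        rw [hA, hB]
        have := ih (j0 + 1) j0 (pieces ++ [(s.drop i).take (j0 - i)]) (by omega) (by omega)
        simpa [List.take_add_one, List.getElem?_drop, hj0, List.getElem?_eq_getElem] using this
      · -- no sign: A's state is unchanged; B extends the buffer by s[j0].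
        have hA : stepA s (pieces, (i : Int)) (j0 : Int) = (pieces, (i : Int)) := by
          simp only [stepA, hget, hsign, if_neg, not_false_iff]
        have hB : stepB (pieces, (s.drop i).take (j0 - i)) s[j0]
            = (pieces, (s.drop i).take (j0 - i) ++ [s[j0]]) := by
          simp only [stepB, hsign, if_neg, not_false_iff]
        rw [hA, hB]
        have := ih (j0 + 1) i pieces (by omega) (by omega)
        have hcur : (s.drop i).take (j0 + 1 - i) = (s.drop i).take (j0 - i) ++ [s[j0]] := by
          have h1 : j0 + 1 - i = (j0 - i) + 1 := by omega
          rw [h1, List.take_add_one, List.getElem?_drop]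
          have h2 : i + (j0 - i) = j0 := by omega
          simp [h2, hj0]
        rw [hcur] at this
        exact this

-- stripping only the last element commutes with the common loop shape
lemma final_eq (s : List Char) :
    (let a := (PySem.List.pyRange (0 : Int) (s.length : Int) 1).foldl (stepA s) ([], 0);
     (a.1 ++ [PySem.Chars.stripChars (PySem.List.slice s (some a.2) none) ['\n']]))
    = (let b := s.foldl stepB ([], []);
       b.1 ++ [PySem.Chars.stripChars b.2 ['\n']]) := by
  have h := loops_agree s s.length 0 0 [] (by omega) (by omega)
  simp only [Nat.cast_zero] at h
  have h1 := congrArg Prod.fst h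
  have h2 := congrArg Prod.snd h
  simp only [List.drop_zero, Nat.sub_self, List.take_zero] at h1 h2
  simp only []
  rw [h1, h2]

-- ===== VERDICT (by name: the statement is the Claim_ definition above) =====
theorem splitRow_spec : Claim_equal_splitRow := by
  intro string _
  unfold Spec_splitRow splitRow splitRow_alt
  simp only []
  rw [final_eq string.toList]
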